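-- pv_equiv track=rewrite | github.com/zhuyan2462/comp110-22f-workspace | exercises/ex04_utils.py | all
-- ===== SOURCE A (Python) =====
-- def all(number_list: list[int], target: int) -> bool:
--     """Check if one integers can be found in the list."""
--     idx: int = 0
--     if len(number_list) == 0:
--         return False
--     while idx <= len(number_list) - 1:
--         if number_list[idx] != target:
--             return False
--         else:
--             idx += 1
--     return True
-- ===== SOURCE B (Python) =====
-- def all(number_list: list[int], target: int) -> bool:
--     return set(number_list) == {target}
-- ===== Notes on version B (the rewrite author's own statement) =====
-- stated objective: idiomatic
-- what changed: Replaces the index-based while-loop with per-element early return by a single set construction compared for equality against the singleton {target} (the empty-list guard disappears: set([]) != {target}).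
import Mathlib
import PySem

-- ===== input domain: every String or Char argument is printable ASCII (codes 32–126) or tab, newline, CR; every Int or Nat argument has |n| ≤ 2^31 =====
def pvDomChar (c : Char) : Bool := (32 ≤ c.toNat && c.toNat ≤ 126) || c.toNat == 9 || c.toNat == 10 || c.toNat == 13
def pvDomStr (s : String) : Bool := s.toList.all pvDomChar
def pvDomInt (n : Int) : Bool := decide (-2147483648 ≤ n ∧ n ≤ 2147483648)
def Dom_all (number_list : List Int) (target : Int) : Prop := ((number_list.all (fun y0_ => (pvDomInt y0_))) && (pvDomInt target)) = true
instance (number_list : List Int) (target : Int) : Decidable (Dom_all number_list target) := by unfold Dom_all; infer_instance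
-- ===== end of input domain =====

-- B replaces A's index-based while-loop by a single set construction compared against {target} (idiomatic).


-- ===== PORT A =====
-- the while loop: 'while idx <= len(number_list) - 1: …' (idx only ever increases by 1 from 0, so Nat)
def allLoop (number_list : List Int) (target : Int) (idx : Nat) : Bool :=
  if (idx : Int) ≤ (number_list.length : Int) - 1 then
    if PySem.List.pyGetD number_list (idx : Int) 0 ≠ target then false
    else allLoop number_list target (idx + 1)
  else true
termination_by number_list.length - idx
decreasing_by omega

def all (number_list : List Int) (target : Int) : Bool :=
  if number_list.length = 0 then false
  else allLoop number_list target 0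

-- ===== PORT B =====
-- 'return set(number_list) == {target}'
def all_alt (number_list : List Int) (target : Int) : Bool :=
  PySem.Set.equal (PySem.Set.ofList number_list) (PySem.Set.ofList [target])

-- ===== PRECONDITION & SPEC =====
def Spec_all (number_list : List Int) (target : Int) (out : Bool) : Prop := out = all_alt number_list target
instance (number_list : List Int) (target : Int) (out : Bool) : Decidable (Spec_all number_list target out) := by unfold Spec_all; infer_instance

-- ===== CLAIM (what is proved, stated in full; the proofs are below) =====
def Claim_equal_all : Prop := ∀ (number_list : List Int) (target : Int), Dom_all number_list target → Spec_all number_list target (all number_list target)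

-- ===== LEMMAS AND PROOFS =====

-- A's loop from index idx computes 'all remaining elements equal target'
theorem allLoop_eq (l : List Int) (t : Int) :
    ∀ n idx, l.length - idx = n →
      allLoop l t idx = (l.drop idx).all (fun x => decide (x = t)) := by
  intro n
  induction n with
  | zero =>
    intro idx hn
    rw [allLoop, if_neg (by omega), List.drop_eq_nil_of_le (by omega)]
    rfl
  | succ m ih =>
    intro idx hn
    have hlt : idx < l.length := by omega
    rw [allLoop, if_pos (by omega)]
    have hget : PySem.List.pyGetD l (idx : Int) 0 = l[idx] := by
      simp [PySem.List.pyGetD_natCast, List.getElem?_eq_getElem hlt]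
    rw [List.drop_eq_getElem_cons hlt, List.all_cons, hget]
    by_cases he : l[idx] = t
    · rw [if_neg (by simp [he]), ih (idx + 1) (by omega)]
      simp [he]
    · rw [if_pos (by simp [he])]
      simp [he]

theorem all_alt_eq_true_iff (l : List Int) (t : Int) :
    all_alt l t = true ↔ (l ≠ [] ∧ ∀ x ∈ l, x = t) := by
  unfold all_alt
  rw [PySem.Set.equal_iff]
  constructor
  · intro h
    have ht : t ∈ l := by
      have := (h t).mpr
      simp [PySem.Set.mem_ofList] at this ⊢
      exact this
    refine ⟨by rintro rfl; simp at ht, ?_⟩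
    intro x hx
    have := (h x).mp (by simp [PySem.Set.mem_ofList, hx])
    simpa [PySem.Set.mem_ofList] using this
  · rintro ⟨hne, hall⟩ x
    rcases List.exists_mem_of_ne_nil l hne with ⟨y, hy⟩
    have hyt := hall y hy
    subst hyt
    simp only [PySem.Set.mem_ofList, List.mem_singleton]
    constructor
    · intro hx; exact hall x hx
    · rintro rfl; exact hy

-- ===== VERDICT (by name: the statement is the Claim_ definition above) =====
theorem all_spec : Claim_equal_all := by
  intro l t _
  unfold Spec_all
  rw [Bool.eq_iff_iff]
  unfold all
  by_cases hnil : l.length = 0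
  · rw [if_pos hnil, all_alt_eq_true_iff]
    simp [List.length_eq_zero_iff.mp hnil]
  · rw [if_neg hnil, allLoop_eq l t (l.length - 0) 0 rfl, all_alt_eq_true_iff, List.drop_zero,
      List.all_eq_true]
    constructor
    · intro h
      exact ⟨by intro h'; simp [h'] at hnil, fun x hx => by simpa using h x hx⟩
    · rintro ⟨_, hall⟩ x hx
      simpa using hall x hx
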